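-- pv_equiv track=rewrite | github.com/CERNDocumentServer/cds-rdm | site/cds_rdm/inspire_harvester/transform/resource_types.py | _select_document_type
-- ===== SOURCE A (Python) =====
-- def _select_document_type(doc_types):
--     """Select document types."""
--     priority = {
--         v: i
--         for i, v in enumerate(
--             [
--                 "thesis",
--                 "conference paper",
--                 "article",
--                 "book chapter",
--                 "book",
--                 "proceedings",
--                 "report",
--                 "activity report",
--                 "note",
--             ]
--         )
--     }
--     # Select the candidate with the highest priority (lowest rank)
--     best_value = min(doc_types, key=lambda v: priority.get(v, float("inf")))
--     return best_value
-- ===== SOURCE B (Python) =====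
-- def _select_document_type(doc_types):
--     """Select document types."""
--     priority_order = [
--         "thesis",
--         "conference paper",
--         "article",
--         "book chapter",
--         "book",
--         "proceedings",
--         "report",
--         "activity report",
--         "note",
--     ]
--     present = set(doc_types)
--     for candidate in priority_order:
--         if candidate in present:
--             return candidate
--     if not doc_types:
--         raise ValueError("empty doc_types")
--     return doc_types[0]
-- ===== Notes on version B (the rewrite author's own statement) =====
-- stated objective: faster
-- what changed: Instead of scanning doc_types with min(key=priority.get) (a Python-level lambda call and dict lookup per element), B builds a membership set of doc_types once and walks the fixed 9-entry preference list in priority order, returning the first preference present, falling back to the first element (raising ValueError on empty input like min).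
import Mathlib
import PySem

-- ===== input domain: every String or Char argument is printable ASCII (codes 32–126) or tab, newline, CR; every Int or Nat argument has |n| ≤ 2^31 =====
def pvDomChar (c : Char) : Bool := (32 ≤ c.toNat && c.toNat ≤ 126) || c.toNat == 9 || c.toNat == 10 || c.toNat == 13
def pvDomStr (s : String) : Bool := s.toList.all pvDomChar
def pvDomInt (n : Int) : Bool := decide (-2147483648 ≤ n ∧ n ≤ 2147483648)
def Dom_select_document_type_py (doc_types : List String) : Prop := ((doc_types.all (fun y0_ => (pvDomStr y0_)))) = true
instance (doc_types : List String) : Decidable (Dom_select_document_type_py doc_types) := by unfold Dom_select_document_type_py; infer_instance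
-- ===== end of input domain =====

-- B replaces A's min-with-key scan of doc_types by a single pass over the fixed preference list
-- with a membership set built from doc_types: same result, fewer per-element Python-level
-- operations (objective: faster; constant-factor, measured).

-- ===== PORT A =====
-- the literal list the dict comprehension of A enumerates
def pvPriorityList : List String :=
  ["thesis", "conference paper", "article", "book chapter", "book",
   "proceedings", "report", "activity report", "note"]

-- priority = {v: i for i, v in enumerate([...])}
def pvPriority : PySem.Dict String Int :=
  (PySem.List.enumerate pvPriorityList).foldl (fun d iv => d.insert iv.2 iv.1) PySem.Dict.empty

-- key = lambda v: priority.get(v, float("inf")).  Lean has no float inf; every stored priority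
-- is 0..8, so the default 9 compares exactly like inf here (hand-port of the default, exact).
def select_document_type_py (doc_types : List String) : String :=
  match PySem.List.min? doc_types (fun v => pvPriority.getD v 9) with
  | some best_value => best_value
  | none => ""   -- min([]) raises ValueError; excluded by Pre_

-- ===== PORT B =====
def select_document_type_py_alt (doc_types : List String) : String :=
  let present := PySem.Set.ofList doc_types
  match pvPriorityList.find? (fun c => present.contains c) with
  | some c => c
  | none =>
    match doc_types with
    | [] => ""   -- Source B raises ValueError on the empty list; excluded by Pre_
    | h :: _ => h

-- ===== PRECONDITION & SPEC =====
-- Pre_ excludes exactly the empty list, on which A raises ValueError (min() of an empty sequence);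
-- B raises ValueError there too.
def Pre_select_document_type_py (doc_types : List String) : Prop := doc_types ≠ []
instance (doc_types : List String) : Decidable (Pre_select_document_type_py doc_types) := by
  unfold Pre_select_document_type_py; infer_instance

def pvWitness_select_document_type_py : List String := ["article", "thesis", "memo"]

def Spec_select_document_type_py (doc_types : List String) (out : String) : Prop :=
  out = select_document_type_py_alt doc_types
instance (doc_types : List String) (out : String) : Decidable (Spec_select_document_type_py doc_types out) := by
  unfold Spec_select_document_type_py; infer_instance

-- ===== CLAIM (what is proved, stated in full; the proofs are below) =====
def Claim_equal_select_document_type_py : Prop :=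
  ∀ (doc_types : List String), Dom_select_document_type_py doc_types →
    Pre_select_document_type_py doc_types →
    Spec_select_document_type_py doc_types (select_document_type_py doc_types)

-- ===== LEMMAS AND PROOFS =====

lemma hpv : pvPriority = PySem.Dict.mk
      [("thesis", 0), ("conference paper", 1), ("article", 2), ("book chapter", 3), ("book", 4),
       ("proceedings", 5), ("report", 6), ("activity report", 7), ("note", 8)] := by decide

def pvRank (v : String) : Nat :=
  if "thesis" = v then 0 else if "conference paper" = v then 1 else if "article" = v then 2
  else if "book chapter" = v then 3 else if "book" = v then 4 else if "proceedings" = v then 5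
  else if "report" = v then 6 else if "activity report" = v then 7 else if "note" = v then 8
  else 9

lemma pvKey_eq (v : String) : pvPriority.getD v 9 = (pvRank v : Int) := by
  rw [hpv]
  simp only [PySem.Dict.getD, PySem.Dict.get?_mk_cons, pvRank, beq_iff_eq]
  split_ifs <;> rfl

lemma pvRank_le (v : String) : pvRank v ≤ 9 := by
  unfold pvRank; split_ifs <;> omega

lemma pvRank_getD (v : String) (h : pvRank v < 9) : pvPriorityList.getD (pvRank v) "" = v := by
  unfold pvRank at *; split_ifs at * <;> simp_all [pvPriorityList]

lemma pvGetD_rank (i : Nat) (h : i < 9) : pvRank (pvPriorityList.getD i "") = i := by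
  interval_cases i <;> decide

def pvPick (b : String) (l : List String) : String :=
  l.foldl (fun m x => if pvRank x < pvRank m then x else m) b

-- the folding step of PySem.List.min? with A's key, rewritten through pvRank

def pvG (acc : Option String) (x : String) : Option String :=
  match acc with
  | none => some x
  | some m => if pvRank x < pvRank m then some x else some m

lemma pvMin?_fold (l : List String) :
    PySem.List.min? l (fun v => pvPriority.getD v 9) = l.foldl pvG none := by
  unfold PySem.List.min?
  congr 1
  funext acc x
  cases acc <;> simp [pvG, pvKey_eq, Nat.cast_lt]

lemma pvFoldlG_some (l : List String) (b : String) :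
    List.foldl pvG (some b) l = some (pvPick b l) := by
  induction l generalizing b with
  | nil => rfl
  | cons x t ih =>
    rw [List.foldl_cons]
    show List.foldl pvG (if pvRank x < pvRank b then some x else some b) t
      = some (pvPick b (x :: t))
    rw [show pvPick b (x :: t) = pvPick (if pvRank x < pvRank b then x else b) t from rfl]
    split_ifs
    · exact ih x
    · exact ih b

lemma pvMin?_eq_pick (l : List String) (b : String) :
    PySem.List.min? (b :: l) (fun v => pvPriority.getD v 9) = some (pvPick b l) := by
  rw [pvMin?_fold, List.foldl_cons]
  exact pvFoldlG_some l b

def pvMrank (b : String) (l : List String) : Nat :=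
  l.foldl (fun m x => min m (pvRank x)) (pvRank b)

lemma pvRank_pick (l : List String) (b : String) : pvRank (pvPick b l) = pvMrank b l := by
  induction l generalizing b with
  | nil => rfl
  | cons x t ih =>
    show pvRank (pvPick (if pvRank x < pvRank b then x else b) t) = _
    rw [ih]
    show List.foldl _ (pvRank (if pvRank x < pvRank b then x else b)) t
      = List.foldl _ (min (pvRank b) (pvRank x)) t
    congr 1
    split_ifs <;> omega

lemma pvPick_mem (l : List String) (b : String) : pvPick b l ∈ b :: l := by
  induction l generalizing b with
  | nil => simp [pvPick]
  | cons x t ih =>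
    show pvPick (if pvRank x < pvRank b then x else b) t ∈ _
    rcases List.mem_cons.mp (ih (if pvRank x < pvRank b then x else b)) with h | h
    · rw [h]; split_ifs <;> simp
    · simp [h]

lemma pvPick_stays (l : List String) (b : String) (h : ∀ x ∈ l, ¬ pvRank x < pvRank b) :
    pvPick b l = b := by
  induction l generalizing b with
  | nil => rfl
  | cons x t ih =>
    show pvPick (if pvRank x < pvRank b then x else b) t = b
    rw [if_neg (h x (by simp))]
    exact ih b (fun y hy => h y (by simp [hy]))

lemma pvFoldlMin_le_init (l : List String) (a : Nat) :
    l.foldl (fun m x => min m (pvRank x)) a <= a := by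
  induction l generalizing a with
  | nil => simp
  | cons x t ih => exact le_trans (ih _) (min_le_left _ _)

lemma pvFoldlMin_le_mem (l : List String) (a : Nat) (x : String) (hx : x ∈ l) :
    l.foldl (fun m x => min m (pvRank x)) a <= pvRank x := by
  induction l generalizing a with
  | nil => simp at hx
  | cons y t ih =>
    rcases List.mem_cons.mp hx with rfl | h
    · exact le_trans (pvFoldlMin_le_init t _) (min_le_right _ _)
    · exact ih _ h

lemma pvFind?_first {p : String → Bool} (l : List String) (i : Nat) (hi : i < l.length)
    (hmem : p (l.getD i "") = true) (hnot : ∀ j, j < i → p (l.getD j "") = false) :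
    l.find? p = some (l.getD i "") := by
  induction l generalizing i with
  | nil => simp at hi
  | cons a r ih =>
    cases i with
    | zero => simp_all [List.find?_cons_of_pos]
    | succ n =>
      have h0 : p a = false := hnot 0 (by omega)
      rw [List.find?_cons_of_neg (by simp [h0])]
      simp only [List.getD_cons_succ]
      exact ih n (by simpa using hi) (by simpa using hmem)
        (fun j hj => by simpa using hnot (j + 1) (by omega))

-- ===== VERDICT (by name: the statement is the Claim_ definition above) =====
theorem select_document_type_py_spec : Claim_equal_select_document_type_py := by
  intro doc_types _ hpre
  unfold Spec_select_document_type_py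
  obtain ⟨h, t, rfl⟩ : ∃ h t, doc_types = h :: t := by
    cases doc_types with
    | nil => exact absurd rfl hpre
    | cons h t => exact ⟨h, t, rfl⟩
  unfold select_document_type_py select_document_type_py_alt
  rw [pvMin?_eq_pick]
  have hcont : (fun c => (PySem.Set.ofList (h :: t)).contains c)
      = (fun c => decide (c ∈ h :: t)) := by
    funext c; by_cases hch : c = h <;> simp [pysem, hch]
  simp only [hcont]
  set m := pvPick h t with hm
  have hmem : m ∈ h :: t := pvPick_mem t h
  have hr : pvRank m = pvMrank h t := pvRank_pick t h
  have hlow : ∀ x ∈ h :: t, pvMrank h t ≤ pvRank x := by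
    intro x hx
    rcases List.mem_cons.mp hx with rfl | hh
    · exact pvFoldlMin_le_init t _
    · exact pvFoldlMin_le_mem t _ _ hh
  by_cases hM : pvRank m < 9
  · -- a known type occurs: B's scan stops exactly at pvPriorityList[pvRank m] = m
    have hmemM : decide (pvPriorityList.getD (pvRank m) "" ∈ h :: t) = true := by
      rw [pvRank_getD m hM]; exact decide_eq_true hmem
    have hnot : ∀ j, j < pvRank m → decide (pvPriorityList.getD j "" ∈ h :: t) = false := by
      intro j hj
      apply decide_eq_false
      intro hin
      have hle := hlow _ hin
      rw [pvGetD_rank j (by omega)] at hle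
      omega
    rw [pvFind?_first pvPriorityList (pvRank m) (by simpa [pvPriorityList] using hM) hmemM hnot,
        pvRank_getD m hM]
  · -- no known type occurs: A keeps the head, B's scan finds nothing and falls back to it
    have h9 : pvRank m = 9 := by have := pvRank_le m; omega
    have hall : ∀ x ∈ h :: t, pvRank x = 9 := by
      intro x hx
      have h1 := hlow x hx
      have h2 := pvRank_le x
      omega
    have hfind : pvPriorityList.find? (fun c => decide (c ∈ h :: t)) = none := by
      rw [List.find?_eq_none]
      intro x hx
      simp only [decide_eq_true_eq]
      intro hc
      have hx9 := hall x hc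
      fin_cases hx <;> simp [pvRank] at hx9
    rw [hfind]
    show m = h
    rw [hm]
    exact pvPick_stays t h (fun x hx => by
      rw [hall x (List.mem_cons_of_mem h hx), hall h List.mem_cons_self]
      omega)
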